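-- pv_equiv track=rewrite | github.com/Fabiola-cc/Correccion_Deteccion | src/Hamming/Hamming_receptor.py | calcular_bits_paridad_en_mensaje
-- ===== SOURCE A (Python) =====
-- def calcular_bits_paridad_en_mensaje(longitud_total):
--     """
--     Calcula cuántos bits de paridad debe tener un mensaje de longitud dada
--     """
--     # Necesitamos encontrar p tal que 2^p >= longitud_total
--     p = 0
--     while 2 ** p < longitud_total:
--         p += 1
--
--     # Verificar que esta cantidad de bits de paridad es correcta
--     # para la longitud del mensaje
--     mensaje_datos = longitud_total - p
--     while 2 ** p < mensaje_datos + p + 1: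
--         p += 1
--         mensaje_datos = longitud_total - p
--
--     return p
-- ===== SOURCE B (Python) =====
-- def calcular_bits_paridad_en_mensaje(longitud_total):
--     # smallest p with 2**p > longitud_total, i.e. the bit length
--     return longitud_total.bit_length() if longitud_total > 0 else 0
-- ===== Notes on version B (the rewrite author's own statement) =====
-- stated objective: idiomatic
-- what changed: Both of A's increment loops together compute the smallest exponent whose power of two exceeds longitud_total; B replaces them with the closed form bit_length() (0 for non-positive input), no loop at all.
import Mathlib
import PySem

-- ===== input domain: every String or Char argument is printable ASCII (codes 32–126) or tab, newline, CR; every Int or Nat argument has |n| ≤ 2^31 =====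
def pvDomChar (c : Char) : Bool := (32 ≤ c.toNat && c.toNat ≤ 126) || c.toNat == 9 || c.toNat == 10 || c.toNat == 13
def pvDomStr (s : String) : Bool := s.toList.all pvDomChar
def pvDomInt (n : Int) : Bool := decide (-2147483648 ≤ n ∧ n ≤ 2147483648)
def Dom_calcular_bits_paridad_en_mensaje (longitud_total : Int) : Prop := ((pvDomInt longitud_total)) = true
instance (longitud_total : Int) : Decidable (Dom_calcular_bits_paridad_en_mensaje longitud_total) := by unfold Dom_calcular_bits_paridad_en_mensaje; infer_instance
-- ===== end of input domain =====

-- B replaces A's two increment loops by the closed form bit_length (0 for non-positive input).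

-- ===== PORT A =====
-- first while loop: p += 1 while 2 ** p < longitud_total
-- termination measure lemma for pvLoop1 (cited by name in decreasing_by)
theorem pvLoop1_measure {L : Int} {p : Nat} (h : (2 : Int) ^ p < L) :
    (L - (2 : Int) ^ (p + 1)).toNat < (L - (2 : Int) ^ p).toNat := by
  have h1 : (2 : Int) ^ p < (2 : Int) ^ (p + 1) :=
    pow_lt_pow_right₀ (by norm_num) (Nat.lt_succ_self p)
  omega

def pvLoop1 (L : Int) (p : Nat) : Nat :=
  if (2 : Int) ^ p < L then pvLoop1 L (p + 1) else p
termination_by (L - (2 : Int) ^ p).toNat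
decreasing_by exact pvLoop1_measure (by assumption)

-- second while loop: p += 1; mensaje_datos = longitud_total - p, while 2 ** p < mensaje_datos + p + 1
-- termination measure lemma for pvLoop2 (cited by name in decreasing_by)
theorem pvLoop2_measure {L : Int} {p : Nat} (h : (2 : Int) ^ p < (L - (p : Int)) + (p : Int) + 1) :
    (L + 1 - (2 : Int) ^ (p + 1)).toNat < (L + 1 - (2 : Int) ^ p).toNat := by
  have h1 : (2 : Int) ^ p < (2 : Int) ^ (p + 1) :=
    pow_lt_pow_right₀ (by norm_num) (Nat.lt_succ_self p)
  omega

def pvLoop2 (L : Int) (p : Nat) : Nat :=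
  if (2 : Int) ^ p < (L - (p : Int)) + (p : Int) + 1 then pvLoop2 L (p + 1) else p
termination_by (L + 1 - (2 : Int) ^ p).toNat
decreasing_by exact pvLoop2_measure (by assumption)

def calcular_bits_paridad_en_mensaje (longitud_total : Int) : Int :=
  ((pvLoop2 longitud_total (pvLoop1 longitud_total 0) : Nat) : Int)

-- ===== PORT B =====
-- longitud_total.bit_length() if longitud_total > 0 else 0  (bit_length = Nat.log2 + 1 for positives)
def calcular_bits_paridad_en_mensaje_alt (longitud_total : Int) : Int :=
  if 0 < longitud_total then ((Nat.log2 longitud_total.toNat + 1 : Nat) : Int) else 0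

-- ===== PRECONDITION & SPEC =====
def Spec_calcular_bits_paridad_en_mensaje (longitud_total : Int) (out : Int) : Prop := out = calcular_bits_paridad_en_mensaje_alt longitud_total
instance (longitud_total : Int) (out : Int) : Decidable (Spec_calcular_bits_paridad_en_mensaje longitud_total out) := by unfold Spec_calcular_bits_paridad_en_mensaje; infer_instance

-- ===== CLAIM (what is proved, stated in full; the proofs are below) =====
def Claim_equal_calcular_bits_paridad_en_mensaje : Prop := ∀ (longitud_total : Int), Dom_calcular_bits_paridad_en_mensaje longitud_total → Spec_calcular_bits_paridad_en_mensaje longitud_total (calcular_bits_paridad_en_mensaje longitud_total)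

-- ===== LEMMAS AND PROOFS =====

theorem pvLoop2_base {L : Int} {p : Nat} (h : L < (2 : Int) ^ p) : pvLoop2 L p = p := by
  unfold pvLoop2
  rw [if_neg]
  omega

theorem pvLoop2_step {L : Int} {p : Nat} (h : (2 : Int) ^ p ≤ L) : pvLoop2 L p = pvLoop2 L (p + 1) := by
  rw [pvLoop2]
  rw [if_pos]
  omega

theorem pvLoop1_le {L : Int} {g : Nat} (hg : L < (2 : Int) ^ g) : ∀ p, p ≤ g → pvLoop1 L p ≤ g := by
  intro p hp
  induction hn : g - p generalizing p with
  | zero =>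
    have hpg : p = g := by omega
    subst hpg
    rw [pvLoop1, if_neg (by omega)]
  | succ n ih =>
    rw [pvLoop1]
    split
    · exact ih (p + 1) (by
        -- 2^p < L < 2^g forces p < g
        by_contra hc
        have hpg : p = g := by omega
        subst hpg; omega) (by
        by_contra hc
        have : p = g := by omega
        subst this; omega)
    · exact hp

-- reaching the fixpoint: if every q < g satisfies 2^q ≤ L and L < 2^g, loop2 from any p ≤ g returns g
theorem pvLoop2_reach {L : Int} {g : Nat} (hg : L < (2 : Int) ^ g)
    (hlow : ∀ q : Nat, q < g → (2 : Int) ^ q ≤ L) : ∀ p, p ≤ g → pvLoop2 L p = g := by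
  intro p hp
  induction hn : g - p generalizing p with
  | zero =>
    have hpg : p = g := by omega
    subst hpg
    exact pvLoop2_base hg
  | succ n ih =>
    have hplt : p < g := by omega
    rw [pvLoop2_step (hlow p hplt)]
    exact ih (p + 1) (by omega) (by omega)

theorem alt_char (L : Int) :
    L < (2 : Int) ^ (calcular_bits_paridad_en_mensaje_alt L).toNat ∧
    (∀ q : Nat, q < (calcular_bits_paridad_en_mensaje_alt L).toNat → (2 : Int) ^ q ≤ L) := by
  unfold calcular_bits_paridad_en_mensaje_alt
  split
  · rename_i hL
    set n := L.toNat with hn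
    have hLn : L = (n : Int) := by omega
    have hn0 : n ≠ 0 := by omega
    have h1 : n < 2 ^ (Nat.log2 n + 1) := Nat.lt_log2_self
    have h2 : 2 ^ Nat.log2 n ≤ n := Nat.log2_self_le hn0
    constructor
    · rw [hLn]
      simp only [Int.toNat_natCast]
      exact_mod_cast h1
    · intro q hq
      simp only [Int.toNat_natCast] at hq
      have hq' : q ≤ Nat.log2 n := by omega
      have : (2 : ℕ) ^ q ≤ 2 ^ Nat.log2 n := Nat.pow_le_pow_right (by norm_num) hq'
      rw [hLn]
      exact_mod_cast le_trans this h2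
  · rename_i hL
    constructor
    · simp; omega
    · intro q hq; simp at hq

theorem main_eq (L : Int) : calcular_bits_paridad_en_mensaje L = calcular_bits_paridad_en_mensaje_alt L := by
  obtain ⟨hg, hlow⟩ := alt_char L
  set g := (calcular_bits_paridad_en_mensaje_alt L).toNat with hgdef
  have halt_nonneg : 0 ≤ calcular_bits_paridad_en_mensaje_alt L := by
    unfold calcular_bits_paridad_en_mensaje_alt; split <;> [positivity; simp]
  have h1 : pvLoop1 L 0 ≤ g := pvLoop1_le hg 0 (Nat.zero_le _)
  have h2 : pvLoop2 L (pvLoop1 L 0) = g := pvLoop2_reach hg hlow _ h1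
  unfold calcular_bits_paridad_en_mensaje
  rw [h2]
  omega

-- ===== VERDICT (by name: the statement is the Claim_ definition above) =====
theorem calcular_bits_paridad_en_mensaje_spec : Claim_equal_calcular_bits_paridad_en_mensaje := by
  intro L _
  unfold Spec_calcular_bits_paridad_en_mensaje
  exact main_eq L
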